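-- pv_equiv track=rewrite | github.com/FreddyBI/micropython | lib/fbi.py | rangepingpong
-- ===== SOURCE A (Python) =====
-- def rangepingpong(start, stop=None, step=None): # ping pong range generator
--   p1=0 if stop is None else start
--   p2=start if stop is None else stop
--   p3=1 if step is None else step
--   i=None
--   for i in range(p1,p2,p3):
--     yield i
--   previ=i
--   if i is not None:
--     for i in reversed(range(p1,p2,p3)):
--       if not previ == i:
--         yield i
-- ===== SOURCE B (Python) =====
-- def rangepingpong(start, stop=None, step=None):
--     # B: build the range once, then one single loop emits forward-then-back via index reflection.
--     p1 = 0 if stop is None else start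
--     p2 = start if stop is None else stop
--     p3 = 1 if step is None else step
--     r = list(range(p1, p2, p3))
--     n = len(r)
--     if n == 0:
--         return
--     for k in range(2 * n - 1):
--         yield r[k] if k < n else r[2 * n - 2 - k]
-- ===== Notes on version B (the rewrite author's own statement) =====
-- stated objective: alternative
-- what changed: B materialises the range once and replaces A's two range loops plus the peak-skip comparison guard by a single loop over 2n-1 indices that reflects the index past the peak (r[k] for k<n, r[2n-2-k] after).
import Mathlib
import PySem

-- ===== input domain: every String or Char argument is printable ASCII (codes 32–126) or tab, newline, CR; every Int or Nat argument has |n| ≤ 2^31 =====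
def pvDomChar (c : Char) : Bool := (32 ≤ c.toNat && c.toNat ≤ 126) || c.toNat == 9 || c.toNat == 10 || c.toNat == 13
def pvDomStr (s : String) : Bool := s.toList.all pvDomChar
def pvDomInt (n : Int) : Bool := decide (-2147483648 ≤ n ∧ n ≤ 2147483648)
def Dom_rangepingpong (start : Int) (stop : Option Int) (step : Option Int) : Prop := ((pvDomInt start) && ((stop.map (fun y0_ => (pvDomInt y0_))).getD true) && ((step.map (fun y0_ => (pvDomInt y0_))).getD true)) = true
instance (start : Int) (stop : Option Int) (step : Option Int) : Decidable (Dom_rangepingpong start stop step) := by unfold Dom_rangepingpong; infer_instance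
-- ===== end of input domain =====

-- B replaces A's two range loops and peak-skip guard by one index-reflection loop; same cost.

-- ===== PORT A =====
-- A: yield range(p1,p2,p3); if the loop ran ('i is not None', i.e. the range is nonempty,
-- and 'i' is the last yielded element), yield reversed(range(...)) skipping elements equal to previ.
def rangepingpong (start : Int) (stop : Option Int) (step : Option Int) : List Int :=
  let p1 : Int := match stop with | none => 0 | some _ => start
  let p2 : Int := match stop with | none => start | some s => s
  let p3 : Int := match step with | none => 1 | some s => s
  let fwd := PySem.List.pyRange p1 p2 p3
  match fwd.getLast? with
  | none => fwd
  | some previ => fwd ++ fwd.reverse.filter (fun i => !(previ == i))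

-- ===== PORT B =====
def rangepingpong_alt (start : Int) (stop : Option Int) (step : Option Int) : List Int :=
  let p1 : Int := match stop with | none => 0 | some _ => start
  let p2 : Int := match stop with | none => start | some s => s
  let p3 : Int := match step with | none => 1 | some s => s
  let r := PySem.List.pyRange p1 p2 p3
  let n := r.length
  if n = 0 then []
  else (List.range (2 * n - 1)).map (fun k =>
    if k < n then PySem.List.pyGetD r (k : Int) 0
    else PySem.List.pyGetD r (2 * (n : Int) - 2 - (k : Int)) 0)

-- ===== PRECONDITION & SPEC =====
-- Pre_ excludes step == 0, on which Python's range() raises ValueError (both A and B raise there).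
def Pre_rangepingpong (start : Int) (stop : Option Int) (step : Option Int) : Prop := step ≠ some 0
instance (start : Int) (stop : Option Int) (step : Option Int) : Decidable (Pre_rangepingpong start stop step) := by unfold Pre_rangepingpong; infer_instance
def pvWitness_rangepingpong : Int × Option Int × Option Int := (1, some 5, some 2)

def Spec_rangepingpong (start : Int) (stop : Option Int) (step : Option Int) (out : List Int) : Prop := out = rangepingpong_alt start stop step
instance (start : Int) (stop : Option Int) (step : Option Int) (out : List Int) : Decidable (Spec_rangepingpong start stop step out) := by unfold Spec_rangepingpong; infer_instance

-- ===== CLAIM (what is proved, stated in full; the proofs are below) =====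
def Claim_equal_rangepingpong : Prop := ∀ (start : Int) (stop : Option Int) (step : Option Int), Dom_rangepingpong start stop step → Pre_rangepingpong start stop step → Spec_rangepingpong start stop step (rangepingpong start stop step)

-- ===== LEMMAS AND PROOFS =====

-- pyRange with step ≠ 0 has no duplicate elements.
theorem pv_nodup_pyRange (a b s : Int) (hs : s ≠ 0) : (PySem.List.pyRange a b s).Nodup := by
  unfold PySem.List.pyRange
  simp only [hs, if_false]
  refine List.Nodup.map ?_ List.nodup_range
  intro k1 k2 h
  have h2 : s * (k1 : Int) = s * (k2 : Int) := by linarith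
  have := mul_left_cancel₀ hs h2
  exact_mod_cast this

-- B's reflected single pass equals the list followed by its reversed tail.
theorem pv_reflect (r : List Int) (hne : r ≠ []) :
    (List.range (2 * r.length - 1)).map (fun k =>
      if k < r.length then PySem.List.pyGetD r (k : Int) 0
      else PySem.List.pyGetD r (2 * (r.length : Int) - 2 - (k : Int)) 0)
    = r ++ r.reverse.tail := by
  have hn : 1 ≤ r.length := List.length_pos_iff.mpr hne
  apply List.ext_getElem
  · simp
    omega
  · intro i h1 h2
    simp only [List.getElem_map, List.getElem_range]
    by_cases hi : i < r.length
    · rw [if_pos hi, PySem.List.pyGetD_natCast, List.getD_eq_getElem _ _ hi,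
        List.getElem_append_left hi]
    · rw [if_neg hi]
      have hlen : i < 2 * r.length - 1 := by simpa using h1
      have hidx : (2 * (r.length : Int) - 2 - (i : Int)) = ((2 * r.length - 2 - i : Nat) : Int) := by
        omega
      rw [hidx, PySem.List.pyGetD_natCast]
      have hlt : 2 * r.length - 2 - i < r.length := by omega
      rw [List.getD_eq_getElem _ _ hlt, List.getElem_append_right (by omega)]
      rw [List.getElem_tail, List.getElem_reverse]
      congr 1
      omega

-- Filtering the reversed list by "≠ last" drops exactly its head when the list has no duplicates.
theorem pv_filter_tail (r : List Int) (hnd : r.Nodup) (a : Int) (ha : r.getLast? = some a) :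
    r.reverse.filter (fun i => !(a == i)) = r.reverse.tail := by
  have hh : r.reverse.head? = some a := by
    rw [List.head?_reverse]; exact ha
  obtain ⟨t, ht⟩ : ∃ t, r.reverse = a :: t := by
    cases hrev : r.reverse with
    | nil => rw [hrev] at hh; simp at hh
    | cons x xs => rw [hrev] at hh; simp at hh; exact ⟨xs, by rw [hh]⟩
  have hndrev : r.reverse.Nodup := List.nodup_reverse.mpr hnd
  rw [ht] at hndrev ⊢
  have hanot : a ∉ t := (List.nodup_cons.mp hndrev).1
  simp only [List.filter_cons, beq_self_eq_true, Bool.not_true, List.tail_cons,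
    Bool.false_eq_true, if_false]
  rw [List.filter_eq_self.mpr]
  intro x hx
  have hne : a ≠ x := fun hax => hanot (hax ▸ hx)
  simp [hne]

-- Core: A's forward-plus-filtered-reverse equals B's reflected single pass, for any Nodup list.
theorem pv_core (r : List Int) (hnd : r.Nodup) :
    (match r.getLast? with
     | none => r
     | some previ => r ++ r.reverse.filter (fun i => !(previ == i)))
    = (if r.length = 0 then []
       else (List.range (2 * r.length - 1)).map (fun k =>
         if k < r.length then PySem.List.pyGetD r (k : Int) 0
         else PySem.List.pyGetD r (2 * (r.length : Int) - 2 - (k : Int)) 0)) := by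
  cases hlast : r.getLast? with
  | none =>
    have : r = [] := List.getLast?_eq_none_iff.mp hlast
    simp [this]
  | some a =>
    have hne : r ≠ [] := by
      intro h; rw [h] at hlast; simp at hlast
    have h0 : r.length ≠ 0 := fun h => hne (List.length_eq_zero_iff.mp h)
    simp only [h0, reduceIte]
    rw [pv_reflect r hne, pv_filter_tail r hnd a hlast]

-- ===== VERDICT (by name: the statement is the Claim_ definition above) =====
theorem rangepingpong_spec : Claim_equal_rangepingpong := by
  intro start stop step _hdom hpre
  unfold Spec_rangepingpong rangepingpong rangepingpong_alt
  have hp3 : (match step with | none => (1 : Int) | some s => s) ≠ 0 := by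
    cases step with
    | none => simp
    | some s => exact fun h => hpre (by simp only at h; rw [h])
  exact pv_core _ (pv_nodup_pyRange _ _ _ hp3)
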